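-- pv_equiv track=rewrite | github.com/sandduurr/aerospace-msc-prep | Software/Python/CS50P/Week2/assignments/plates.py | numbers_at_end
-- ===== SOURCE A (Python) =====
-- def numbers_at_end(s):
--     reached_numbers = False
--     for letter in s:
--         if letter.isdigit():
--             reached_numbers = True
--         if reached_numbers and letter.isalpha():
--             return False
--     return True
-- ===== SOURCE B (Python) =====
-- def numbers_at_end(s):
--     i = None
--     for j, ch in enumerate(s):
--         if ch.isdigit():
--             i = j
--             break
--     if i is None:
--         return True
--     return not any(ch.isalpha() for ch in s[i:])
-- ===== Notes on version B (the rewrite author's own statement) =====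
-- stated objective: alternative
-- what changed: Replaces the single fused loop carrying a reached_numbers flag by two phases: first locate the index of the first digit (enumerate + break), then check the suffix from that index for any letter with any().
import Mathlib
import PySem

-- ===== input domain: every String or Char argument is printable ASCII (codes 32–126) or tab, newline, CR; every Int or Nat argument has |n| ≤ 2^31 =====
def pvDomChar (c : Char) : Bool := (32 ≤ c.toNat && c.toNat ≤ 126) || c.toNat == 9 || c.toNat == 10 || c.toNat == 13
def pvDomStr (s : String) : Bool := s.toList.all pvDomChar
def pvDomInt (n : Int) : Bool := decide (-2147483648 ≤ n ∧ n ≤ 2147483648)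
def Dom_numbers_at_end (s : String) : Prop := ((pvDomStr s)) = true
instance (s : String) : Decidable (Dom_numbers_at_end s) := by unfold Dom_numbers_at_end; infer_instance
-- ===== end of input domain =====

-- ===== PORT A =====
-- A's fused loop with a reached_numbers flag; early return False becomes the false branch.
def pvLoopA : List Char → Bool → Bool
  | [], _ => true
  | c :: rest, reached =>
    let reached := if PySem.Chars.isdigit c then true else reached
    if reached && PySem.Chars.isalpha c then false else pvLoopA rest reached

def numbers_at_end (s : String) : Bool := pvLoopA s.toList false

-- ===== PORT B =====
-- Phase 1 of Source B: enumerate with break, returning the index of the first digit.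
def pvFindDigit : List Char → Nat → Option Nat
  | [], _ => none
  | c :: rest, j => if PySem.Chars.isdigit c then some j else pvFindDigit rest (j + 1)

-- s[i:] with 0 ≤ i ≤ len s is exactly List.drop i; any(ch.isalpha() …) is List.any.
def numbers_at_end_alt (s : String) : Bool :=
  match pvFindDigit s.toList 0 with
  | none => true
  | some i => !((s.toList.drop i).any PySem.Chars.isalpha)

-- ===== PRECONDITION & SPEC =====
def Spec_numbers_at_end (s : String) (out : Bool) : Prop := out = numbers_at_end_alt s
instance (s : String) (out : Bool) : Decidable (Spec_numbers_at_end s out) := by unfold Spec_numbers_at_end; infer_instance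

-- ===== CLAIM (what is proved, stated in full; the proofs are below) =====
def Claim_equal_numbers_at_end : Prop := ∀ (s : String), Dom_numbers_at_end s → Spec_numbers_at_end s (numbers_at_end s)

-- ===== LEMMAS AND PROOFS =====
-- Once the flag is set, A's loop just checks the rest for a letter.
theorem pvLoopA_true (l : List Char) : pvLoopA l true = !(l.any PySem.Chars.isalpha) := by
  induction l with
  | nil => rfl
  | cons c r ih => simp [pvLoopA, ih]

-- Main invariant: B's find-then-scan agrees with A's flag-off loop, for any prefix already passed.
theorem pvLoop_eq (l : List Char) : ∀ (pre : List Char),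
    (match pvFindDigit l pre.length with
      | none => true
      | some i => !(((pre ++ l).drop i).any PySem.Chars.isalpha)) = pvLoopA l false := by
  induction l with
  | nil => intro pre; rfl
  | cons c r ih =>
    intro pre
    by_cases hd : PySem.Chars.isdigit c
    · simp [pvFindDigit, hd, pvLoopA, List.drop_left' (l₁ := pre) rfl, pvLoopA_true]
    · simpa [pvFindDigit, hd, pvLoopA, List.append_assoc] using ih (pre ++ [c])

-- ===== VERDICT (by name: the statement is the Claim_ definition above) =====
theorem numbers_at_end_spec : Claim_equal_numbers_at_end := by
  intro s _
  unfold Spec_numbers_at_end numbers_at_end numbers_at_end_alt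
  have := pvLoop_eq s.toList []
  simpa using this.symm
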